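-- pv_equiv track=rewrite | github.com/laoyaoer/configparse | h3cmultiline.py | get_groups
-- ===== SOURCE A (Python) =====
-- def get_groups(seq, group_by):
--     data = []
--     for line in seq:
--         if line.startswith(group_by):
--             if data:
--                 yield data
--                 data = []
--         data.append(line)
--     if data:
--         yield data
-- ===== SOURCE B (Python) =====
-- def get_groups(seq, group_by):
--     rev = []  # groups back-to-front; each group's lines back-to-front
--     for line in reversed(list(seq)):
--         if rev and not rev[-1][-1].startswith(group_by):
--             rev[-1].append(line)
--         else:
--             rev.append([line])
--     for group in reversed(rev):
--         group.reverse()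
--         yield group
-- ===== Notes on version B (the rewrite author's own statement) =====
-- stated objective: alternative
-- what changed: Replaces A's forward accumulate-and-flush loop (open-group buffer, conditional yield, final flush) with a single backward pass that builds the group list back-to-front, deciding per line whether it merges into the following group or opens a new one.
import Mathlib
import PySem

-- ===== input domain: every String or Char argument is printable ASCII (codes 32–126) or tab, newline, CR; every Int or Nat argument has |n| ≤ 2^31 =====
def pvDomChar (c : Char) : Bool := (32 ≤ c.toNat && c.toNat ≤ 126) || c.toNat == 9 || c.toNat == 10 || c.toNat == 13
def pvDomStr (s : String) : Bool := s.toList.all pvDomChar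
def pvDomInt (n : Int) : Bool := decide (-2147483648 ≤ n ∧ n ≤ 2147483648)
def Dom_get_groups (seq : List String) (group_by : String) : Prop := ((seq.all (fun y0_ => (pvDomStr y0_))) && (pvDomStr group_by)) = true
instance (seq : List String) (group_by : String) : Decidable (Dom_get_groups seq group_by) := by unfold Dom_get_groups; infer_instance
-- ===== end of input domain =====

-- B replaces A's accumulate-and-flush forward loop by a single backward pass that
-- builds the groups back-to-front (objective: alternative decomposition, same cost).

-- ===== PORT A =====
-- A's loop state: (groups yielded so far, current open group `data`); final flush of `data`.
def get_groups (seq : List String) (group_by : String) : List (List String) :=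
  let st := seq.foldl (fun (p : List (List String) × List String) line =>
    if PySem.Str.startswith line group_by then
      if p.2 ≠ [] then (p.1 ++ [p.2], [line]) else (p.1, p.2 ++ [line])
    else (p.1, p.2 ++ [line])) ([], [])
  if st.2 ≠ [] then st.1 ++ [st.2] else st.1

-- ===== PORT B =====
def get_groups_alt (seq : List String) (group_by : String) : List (List String) :=
  -- backward pass: rev holds the groups back-to-front, each group's lines back-to-front
  let rev := seq.reverse.foldl (fun rev line =>
    if rev ≠ [] ∧ ¬ PySem.Str.startswith ((rev.getLastD []).getLastD "") group_by then
      rev.dropLast ++ [rev.getLastD [] ++ [line]]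
    else rev ++ [[line]]) []
  rev.reverse.map List.reverse

-- ===== PRECONDITION & SPEC =====
def Spec_get_groups (seq : List String) (group_by : String) (out : List (List String)) : Prop := out = get_groups_alt seq group_by
instance (seq : List String) (group_by : String) (out : List (List String)) : Decidable (Spec_get_groups seq group_by out) := by unfold Spec_get_groups; infer_instance

-- ===== CLAIM (what is proved, stated in full; the proofs are below) =====
def Claim_equal_get_groups : Prop := ∀ (seq : List String) (group_by : String), Dom_get_groups seq group_by → Spec_get_groups seq group_by (get_groups seq group_by)

-- ===== LEMMAS AND PROOFS =====

-- Proofs are carried out over an abstract boolean predicate `p` (the startswith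
-- test), then instantiated; this keeps simp from unfolding the string primitive.

def stepA (p : String → Bool) (st : List (List String) × List String) (line : String) :
    List (List String) × List String :=
  if p line then
    if st.2 ≠ [] then (st.1 ++ [st.2], [line]) else (st.1, st.2 ++ [line])
  else (st.1, st.2 ++ [line])

def flushA (st : List (List String) × List String) : List (List String) :=
  if st.2 ≠ [] then st.1 ++ [st.2] else st.1

def stepB (p : String → Bool) (line : String) (out : List (List String)) : List (List String) :=
  match out with
  | [] => [[line]]
  | g :: gs => if ¬ p (g.headD "") then (line :: g) :: gs else [line] :: g :: gs

def runA (p : String → Bool) (data : List String) : List String → List (List String)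
  | [] => if data ≠ [] then [data] else []
  | x :: xs => if p x ∧ data ≠ [] then data :: runA p [x] xs else runA p (data ++ [x]) xs

theorem foldA_eq_runA (p : String → Bool) (xs : List String) :
    ∀ (groups : List (List String)) (data : List String),
    flushA (xs.foldl (stepA p) (groups, data)) = groups ++ runA p data xs := by
  induction xs with
  | nil =>
    intro groups data
    simp only [List.foldl_nil, runA, flushA]
    split <;> simp_all
  | cons x xs ih =>
    intro groups data
    simp only [List.foldl_cons, runA, stepA]
    by_cases hs : p x = true
    · by_cases hd : data = []
      · simp [hs, hd, ih]
      · simp [hs, hd, ih]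
    · simp [hs, ih]

theorem runA_eq_foldB (p : String → Bool) (xs : List String) :
    ∀ (data : List String), data ≠ [] →
    runA p data xs =
      (match xs.foldr (stepB p) [] with
       | [] => [data]
       | g :: gs => if p (g.headD "") then data :: g :: gs else (data ++ g) :: gs) := by
  induction xs with
  | nil => intro data hd; simp [runA, hd]
  | cons x xs ih =>
    intro data hd
    simp only [List.foldr_cons, runA]
    by_cases hs : p x = true
    · rw [if_pos ⟨hs, hd⟩, ih [x] (by simp)]
      cases hxs : xs.foldr (stepB p) [] with
      | nil => simp [stepB, hs]
      | cons g' gs' =>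
        cases hh : p (g'.head?.getD "")
        · simp [stepB, hh, hs]
        · simp [stepB, hh, hs]
    · rw [if_neg (by simp [hs]), ih (data ++ [x]) (by simp)]
      cases hxs : xs.foldr (stepB p) [] with
      | nil => simp [stepB, hs]
      | cons g' gs' =>
        cases hh : p (g'.head?.getD "")
        · simp [stepB, hh, hs]
        · simp [stepB, hh, hs]

def stepR (p : String → Bool) (rev : List (List String)) (line : String) : List (List String) :=
  if rev ≠ [] ∧ ¬ p ((rev.getLastD []).getLastD "") then
    rev.dropLast ++ [rev.getLastD [] ++ [line]]
  else rev ++ [[line]]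

-- the reversed-representation mirror: Python's append-built state vs the cons-built one
def M (out : List (List String)) : List (List String) := (out.map List.reverse).reverse

theorem stepR_eq_M_stepB (p : String → Bool) (line : String) (out : List (List String))
    (h : ∀ g ∈ out, g ≠ []) : stepR p (M out) line = M (stepB p line out) := by
  cases out with
  | nil => simp [stepR, M, stepB]
  | cons g gs =>
    have hg : g ≠ [] := h g (by simp)
    have hlast : (g.reverse).getLast? = some (g.head?.getD "") := by
      cases g with
      | nil => simp at hg
      | cons a t => simp
    cases hh : p (g.head?.getD "") <;>
      simp [stepR, M, stepB, List.getLastD_eq_getLast?, List.getLast?_concat, hlast, hh,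
        List.dropLast_concat]

theorem stepB_groups_ne_nil (p : String → Bool) (line : String) (out : List (List String))
    (h : ∀ g ∈ out, g ≠ []) : ∀ g ∈ stepB p line out, g ≠ [] := by
  cases out with
  | nil => simp [stepB]
  | cons g gs =>
    intro g' hg'
    simp only [stepB] at hg'
    split at hg'
    · rcases List.mem_cons.mp hg' with h1 | h1
      · subst h1; simp
      · exact h g' (List.mem_cons_of_mem _ h1)
    · rcases List.mem_cons.mp hg' with h1 | h1
      · subst h1; simp
      · exact h g' h1

theorem foldl_stepR_eq (p : String → Bool) (l : List String) :
    ∀ (out : List (List String)), (∀ g ∈ out, g ≠ []) →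
    l.foldl (stepR p) (M out) = M (l.foldl (fun o line => stepB p line o) out) := by
  induction l with
  | nil => intro out _; rfl
  | cons x l ih =>
    intro out h
    simp only [List.foldl_cons]
    rw [stepR_eq_M_stepB p x out h, ih _ (stepB_groups_ne_nil p x out h)]

theorem alt_eq_foldr (seq : List String) (gb : String) :
    get_groups_alt seq gb = seq.foldr (stepB fun l => PySem.Str.startswith l gb) [] := by
  set p : String → Bool := fun l => PySem.Str.startswith l gb with hp
  have h0 : get_groups_alt seq gb =
      (seq.reverse.foldl (stepR p) []).reverse.map List.reverse := rfl
  have h1 : seq.reverse.foldl (stepR p) [] = M (seq.foldr (stepB p) []) := by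
    have := foldl_stepR_eq p seq.reverse [] (by simp)
    simpa [M, List.foldl_reverse] using this
  rw [h0, h1]
  simp [M, List.map_reverse, Function.comp_def]

theorem a_eq_b (seq : List String) (gb : String) :
    get_groups seq gb = get_groups_alt seq gb := by
  set p : String → Bool := fun l => PySem.Str.startswith l gb with hp
  have hA : get_groups seq gb = flushA (seq.foldl (stepA p) ([], [])) := rfl
  have hB : get_groups_alt seq gb = seq.foldr (stepB p) [] := alt_eq_foldr seq gb
  rw [hA, hB, foldA_eq_runA p seq [] []]
  cases seq with
  | nil => simp [runA]
  | cons x xs =>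
    have h1 : runA p [] (x :: xs) = runA p [x] xs := by simp [runA]
    rw [List.nil_append, h1, runA_eq_foldB p xs [x] (by simp), List.foldr_cons]
    cases hxs : xs.foldr (stepB p) [] with
    | nil => simp [stepB]
    | cons g' gs' =>
      cases hh : p (g'.head?.getD "")
      · simp [stepB, hh]
      · simp [stepB, hh]

-- ===== VERDICT (by name: the statement is the Claim_ definition above) =====
theorem get_groups_spec : Claim_equal_get_groups := by
  intro seq gb _
  unfold Spec_get_groups
  exact a_eq_b seq gb
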